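-- pv_equiv track=rewrite | github.com/CMU15-112/lecture_demos_qatar | lec19.py | isBalancedH
-- ===== SOURCE A (Python) =====
-- def isBalancedH(s):
--     if s == "":
--         return 0
--     if s[0] == "(":
--         r = 1 + isBalancedH(s[1:])
--         if r > 0:
--             return 10000000000
--         return r
--     if s[0] == ")":
--         r = -1 + isBalancedH(s[1:])
--         return r
--     r = isBalancedH(s[1:])
--     return r
-- ===== SOURCE B (Python) =====
-- def isBalancedH(s):
--     acc = 0
--     for c in reversed(s):
--         if c == "(":
--             acc += 1
--             if acc > 0:
--                 acc = 10000000000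
--         elif c == ")":
--             acc -= 1
--     return acc
-- ===== Notes on version B (the rewrite author's own statement) =====
-- stated objective: faster
-- what changed: Replaces the recursion with string slicing at every step by a single right-to-left loop over the characters with an integer accumulator, so no substrings are ever built.
import Mathlib
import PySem

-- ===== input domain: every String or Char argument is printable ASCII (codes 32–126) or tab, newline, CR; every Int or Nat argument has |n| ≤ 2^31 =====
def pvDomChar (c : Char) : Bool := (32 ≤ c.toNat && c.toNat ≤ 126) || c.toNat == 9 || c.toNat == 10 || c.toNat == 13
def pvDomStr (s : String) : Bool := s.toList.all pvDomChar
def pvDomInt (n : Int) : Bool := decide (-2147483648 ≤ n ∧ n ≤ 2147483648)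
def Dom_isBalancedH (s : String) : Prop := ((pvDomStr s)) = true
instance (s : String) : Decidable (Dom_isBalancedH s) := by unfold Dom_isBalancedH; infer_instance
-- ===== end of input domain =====

-- B replaces A's slicing recursion by a single right-to-left fold over the characters (no substrings built).


-- ===== PORT A =====
-- A recurses on the string: s == "" → 0; '(' → 1 + rec, clamped to 10000000000 if positive; ')' → -1 + rec; other → rec.
def isBalancedH_goA : List Char → Int
  | [] => 0
  | c :: rest =>
    if c = '(' then
      let r := 1 + isBalancedH_goA rest
      if r > 0 then 10000000000 else r
    else if c = ')' then
      -1 + isBalancedH_goA rest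
    else
      isBalancedH_goA rest

def isBalancedH (s : String) : Int := isBalancedH_goA s.toList

-- ===== PORT B =====
-- B: one loop over reversed(s) with an accumulator.
def isBalancedH_step (acc : Int) (c : Char) : Int :=
  if c = '(' then
    let a := acc + 1
    if a > 0 then 10000000000 else a
  else if c = ')' then acc - 1
  else acc

def isBalancedH_alt (s : String) : Int := s.toList.reverse.foldl isBalancedH_step 0

-- ===== PRECONDITION & SPEC =====
def Spec_isBalancedH (s : String) (out : Int) : Prop := out = isBalancedH_alt s
instance (s : String) (out : Int) : Decidable (Spec_isBalancedH s out) := by unfold Spec_isBalancedH; infer_instance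

-- ===== CLAIM (what is proved, stated in full; the proofs are below) =====
def Claim_equal_isBalancedH : Prop := ∀ (s : String), Dom_isBalancedH s → Spec_isBalancedH s (isBalancedH s)

-- ===== LEMMAS AND PROOFS =====
theorem isBalancedH_goA_eq_foldr (l : List Char) :
    isBalancedH_goA l = l.foldr (fun c acc => isBalancedH_step acc c) 0 := by
  induction l with
  | nil => rfl
  | cons c rest ih =>
    simp only [isBalancedH_goA, List.foldr, isBalancedH_step, ih]
    split_ifs <;> omega

-- ===== VERDICT (by name: the statement is the Claim_ definition above) =====
theorem isBalancedH_spec : Claim_equal_isBalancedH := by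
  intro s _
  unfold Spec_isBalancedH isBalancedH isBalancedH_alt
  rw [List.foldl_reverse, isBalancedH_goA_eq_foldr]
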